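-- pv_equiv track=rewrite | github.com/wahyuhiddayat/vectorless-and-vector-rag-for-indonesian-law | vectorless/indexing/build.py | pick_main_pdf
-- ===== SOURCE A (Python) =====
-- def pick_main_pdf(metadata: dict) -> str | None:
--     """Return the main law PDF filename, excluding Lampiran appendix files.
--
--     Filters out Lampiran PDFs (tables, maps, org charts) that would break the
--     parser, then picks the shortest remaining filename as a heuristic for the
--     primary law text. Returns None if no pdf_files are listed in metadata.
--     """
--     pdf_files = metadata.get("pdf_files", [])
--     if not pdf_files:
--         return None
--     if len(pdf_files) == 1:
--         return pdf_files[0]["filename"]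
--
--     # Filter out lampiran files
--     candidates = [
--         p["filename"] for p in pdf_files
--         if "Lampiran" not in p["filename"]
--     ]
--     if not candidates:
--         candidates = [p["filename"] for p in pdf_files]
--
--     return min(candidates, key=len)
-- ===== SOURCE B (Python) =====
-- def pick_main_pdf(metadata: dict) -> str | None:
--     """Return the main law PDF filename, excluding Lampiran appendix files.
--
--     Sort-then-scan: stable-sort all filenames by length, then return the
--     first one in that ranking without 'Lampiran'; if every name contains
--     'Lampiran', the head of the ranking (the shortest name overall).
--     Stability of sorted() preserves min(key=len)'s first-occurrence ties.
--     """
--     pdf_files = metadata.get("pdf_files", [])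
--     if not pdf_files:
--         return None
--     ranked = sorted((p["filename"] for p in pdf_files), key=len)
--     return next((name for name in ranked if "Lampiran" not in name), ranked[0])
-- ===== Notes on version B (the rewrite author's own statement) =====
-- stated objective: alternative
-- what changed: Replaces A's filter-comprehension / fallback-comprehension / min(key=len) pipeline (plus a len==1 shortcut) by a stable length-sort of all filenames followed by a scan for the first non-Lampiran name, falling back to the head of the ranking.
import Mathlib
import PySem

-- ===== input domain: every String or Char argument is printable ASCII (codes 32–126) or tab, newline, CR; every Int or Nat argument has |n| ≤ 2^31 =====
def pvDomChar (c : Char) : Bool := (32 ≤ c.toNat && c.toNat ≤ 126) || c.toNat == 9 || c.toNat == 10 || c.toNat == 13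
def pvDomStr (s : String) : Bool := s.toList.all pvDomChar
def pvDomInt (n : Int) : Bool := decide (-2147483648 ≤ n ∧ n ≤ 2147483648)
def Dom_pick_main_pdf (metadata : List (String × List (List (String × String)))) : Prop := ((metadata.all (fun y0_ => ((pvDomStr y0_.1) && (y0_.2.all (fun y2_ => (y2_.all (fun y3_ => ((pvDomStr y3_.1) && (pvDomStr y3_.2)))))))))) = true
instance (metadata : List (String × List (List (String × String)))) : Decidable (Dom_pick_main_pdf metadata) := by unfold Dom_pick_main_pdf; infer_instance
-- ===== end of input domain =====

-- B replaces A's filter/fallback comprehensions + min(key=len) by a stable length-sort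
-- of all filenames followed by a scan for the first non-Lampiran name (alternative
-- decomposition, same return value on Pre_ = inputs where A raises no KeyError).

-- ===== PORT A =====
-- p["filename"]: ported as getD with default ""; exact on Pre_ (the key is present; KeyError excluded).
def pvFname (p : List (String × String)) : String :=
  PySem.Dict.getD (PySem.Dict.mk p) "filename" ""

def pick_main_pdf (metadata : List (String × List (List (String × String)))) : Option String :=
  let pdf_files := PySem.Dict.getD (PySem.Dict.mk metadata) "pdf_files" []
  if pdf_files = [] then none
  else if pdf_files.length = 1 then
    some (pvFname pdf_files[0]!)
  else
    let candidates := (pdf_files.filter (fun p => !(PySem.Str.isIn "Lampiran" (pvFname p)))).map pvFname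
    let candidates := if candidates = [] then pdf_files.map pvFname else candidates
    PySem.List.min? candidates PySem.Str.len

-- ===== PORT B =====
def pick_main_pdf_alt (metadata : List (String × List (List (String × String)))) : Option String :=
  let pdf_files := PySem.Dict.getD (PySem.Dict.mk metadata) "pdf_files" []
  if pdf_files = [] then none
  else
    let ranked := PySem.List.sorted (pdf_files.map pvFname) PySem.Str.len false
    match List.find? (fun name => !(PySem.Str.isIn "Lampiran" name)) ranked with
    | some name => some name
    | none => ranked.head?   -- ranked[0]; ranked ≠ [] here since pdf_files ≠ []

-- ===== PRECONDITION & SPEC =====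
-- Pre_ excludes exactly the inputs on which A raises KeyError: some pdf dict lacks the "filename" key.
def Pre_pick_main_pdf (metadata : List (String × List (List (String × String)))) : Prop :=
  ∀ p ∈ PySem.Dict.getD (PySem.Dict.mk metadata) "pdf_files" [],
    (PySem.Dict.mk p).contains "filename" = true
instance (metadata : List (String × List (List (String × String)))) : Decidable (Pre_pick_main_pdf metadata) := by unfold Pre_pick_main_pdf; infer_instance

def pvWitness_pick_main_pdf : (List (String × List (List (String × String)))) :=
  [("pdf_files", [[("filename", "uu13.pdf")], [("filename", "Lampiran-uu13.pdf")]])]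

def Spec_pick_main_pdf (metadata : List (String × List (List (String × String)))) (out : Option String) : Prop := out = pick_main_pdf_alt metadata
instance (metadata : List (String × List (List (String × String)))) (out : Option String) : Decidable (Spec_pick_main_pdf metadata out) := by unfold Spec_pick_main_pdf; infer_instance

-- ===== CLAIM (what is proved, stated in full; the proofs are below) =====
def Claim_equal_pick_main_pdf : Prop := ∀ (metadata : List (String × List (List (String × String)))), Dom_pick_main_pdf metadata → Pre_pick_main_pdf metadata → Spec_pick_main_pdf metadata (pick_main_pdf metadata)

-- ===== LEMMAS AND PROOFS =====

-- find? over insertBy into a key-sorted list: the new element wins iff it passes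
-- the predicate and its key beats the previous first hit strictly.
theorem pvFind_insertBy {α κ : Type} [LinearOrder κ] (key : α → κ) (ok : α → Bool) (x : α)
    (s : List α) (hs : s.Pairwise (fun a b => key a ≤ key b)) :
    List.find? ok (PySem.List.insertBy (fun a b => decide (key a < key b)) x s) =
      match List.find? ok s with
      | none => if ok x then some x else none
      | some r => if key x < key r ∧ ok x = true then some x else some r := by
  induction s with
  | nil =>
      cases h : ok x <;> simp [PySem.List.insertBy, h]
  | cons y t ih =>
      have hyt : ∀ z ∈ t, key y ≤ key z := (List.pairwise_cons.mp hs).1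
      have ht : t.Pairwise (fun a b => key a ≤ key b) := (List.pairwise_cons.mp hs).2
      by_cases hxy : key x < key y
      · simp only [PySem.List.insertBy, hxy, decide_true, if_true]
        cases hr : List.find? ok (y :: t) with
        | none =>
            rw [List.find?_cons, hr]
            cases hx : ok x <;> simp [hx]
        | some r =>
            have hry : key y ≤ key r := by
              have : r ∈ y :: t := List.mem_of_find?_eq_some hr
              rcases List.mem_cons.mp this with h | h
              · exact le_of_eq (congrArg key h.symm)
              · exact hyt r h
            have hxr : key x < key r := lt_of_lt_of_le hxy hry
            rw [List.find?_cons, hr]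
            cases hx : ok x <;> simp [hx, hxr, hr]
      · simp only [PySem.List.insertBy, hxy, decide_false, Bool.false_eq_true, if_false]
        cases hy : ok y with
        | true =>
            have hno : ¬ (key x < key y ∧ ok x = true) := fun h => hxy h.1
            simp [hy, hno]
        | false =>
            rw [List.find?_cons]
            simp only [hy]
            rw [ih ht]
            simp [hy]

-- min? over an appended singleton is one running-min step.
theorem pvMin?_append_singleton {α κ : Type} [LinearOrder κ] (key : α → κ)
    (l : List α) (x : α) :
    PySem.List.min? (l ++ [x]) key =
      match PySem.List.min? l key with
      | none => some x
      | some m => if key x < key m then some x else some m := by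
  unfold PySem.List.min?
  rw [List.foldl_append]
  rfl

-- THE characterisation: scanning the stable length-sort for the first hit of ok
-- computes exactly min(filter ok, key) with Python's first-occurrence tie rule.
theorem pvFind_sorted {α κ : Type} [LinearOrder κ] (key : α → κ) (ok : α → Bool)
    (xs : List α) :
    List.find? ok (PySem.List.sorted xs key false) =
      PySem.List.min? (xs.filter ok) key := by
  induction xs using List.reverseRecOn with
  | nil => rfl
  | append_singleton xs x ih =>
      have hsorted : PySem.List.sorted (xs ++ [x]) key false =
          PySem.List.insertBy (fun a b => decide (key a < key b)) x
            (PySem.List.sorted xs key false) := by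
        rw [PySem.List.sorted_eq_foldl_insertBy, List.foldl_append,
          ← PySem.List.sorted_eq_foldl_insertBy]
        rfl
      rw [hsorted,
        pvFind_insertBy key ok x _ (PySem.List.sorted_pairwise xs key),
        ih, List.filter_append]
      cases hx : ok x with
      | true =>
          simp only [List.filter_cons, hx, if_true, List.filter_nil,
            pvMin?_append_singleton]
          cases hm : PySem.List.min? (xs.filter ok) key with
          | none => rfl
          | some m => by_cases h : key x < key m <;> simp [h, hx]
      | false =>
          simp only [List.filter_cons, hx, Bool.false_eq_true, if_false,
            List.filter_nil, List.append_nil]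
          cases hm : PySem.List.min? (xs.filter ok) key with
          | none => simp [hx]
          | some m =>
              have : ¬ (key x < key m ∧ ok x = true) := by
                intro h; rw [hx] at h; exact absurd h.2 (by simp)
              simp [this]

-- the head of the stable sort is min with no filter
theorem pvHead_sorted {α κ : Type} [LinearOrder κ] (key : α → κ) (xs : List α) :
    (PySem.List.sorted xs key false).head? = PySem.List.min? xs key := by
  have h := pvFind_sorted key (fun _ => true) xs
  simp only [List.filter_true] at h
  rw [← h]
  cases PySem.List.sorted xs key false <;> simp [List.find?]

-- A's filter-then-map candidate names, expressed over the name list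
theorem pvCandidates_eq (xs : List (List (String × String))) :
    (xs.filter (fun p => !(PySem.Str.isIn "Lampiran" (pvFname p)))).map pvFname =
      (xs.map pvFname).filter (fun n => !(PySem.Str.isIn "Lampiran" n)) := by
  rw [List.filter_map]
  rfl

theorem pick_eq (metadata : List (String × List (List (String × String)))) :
    pick_main_pdf metadata = pick_main_pdf_alt metadata := by
  unfold pick_main_pdf pick_main_pdf_alt
  cases hxs : PySem.Dict.getD (PySem.Dict.mk metadata) "pdf_files" [] with
  | nil => simp
  | cons p t =>
      simp only [reduceCtorEq, ite_false]
      rw [pvFind_sorted]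
      set ok : String → Bool := fun n => !(PySem.Str.isIn "Lampiran" n) with hok
      cases t with
      | nil =>
          -- A's len == 1 shortcut vs B's sort-and-scan on a singleton
          simp only [List.length_singleton, if_true, List.getElem!_cons_zero]
          cases h : ok (pvFname p) with
          | true => simp [PySem.List.min?, List.filter, h, List.map]
          | false =>
              simp only [List.map, List.filter, h]
              rw [pvHead_sorted]
              rfl
      | cons q u =>
          have hlen : (p :: q :: u).length ≠ 1 := by simp
          rw [if_neg hlen, pvCandidates_eq]
          set names := (p :: q :: u).map pvFname with hnames
          cases hc : PySem.List.min? (names.filter ok) PySem.Str.len with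
          | none =>
              have hnil : names.filter ok = [] :=
                (PySem.List.min?_eq_none_iff _ _).mp hc
              rw [hnil, if_pos rfl, pvHead_sorted]
          | some s =>
              have hne : names.filter ok ≠ [] := by
                intro h
                rw [h] at hc
                simp [PySem.List.min?] at hc
              rw [if_neg hne, hc]

-- ===== VERDICT (by name: the statement is the Claim_ definition above) =====
theorem pick_main_pdf_spec : Claim_equal_pick_main_pdf := by
  intro metadata _ _
  unfold Spec_pick_main_pdf
  exact pick_eq metadata
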